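-- pv_equiv track=rewrite | github.com/SandiNavoiy/Leet_code | easy/2200.py | findKDistantIndices
-- ===== SOURCE A (Python) =====
-- def findKDistantIndices(nums: list[int], key: int, k: int) -> list[int]:
--     """"""
--     new = []
--     x = len(nums)
--     for i in range(x):
--         for j in range(max(0, i - k), min(len(nums), i + k + 1)):
--             if nums[j] == key:
--                 if i not in new:
--                     new.append(i)
--     return new
-- ===== SOURCE B (Python) =====
-- def findKDistantIndices(nums: list[int], key: int, k: int) -> list[int]:
--     n = len(nums)
--     res = []
--     nxt = 0  # next index not yet emitted; everything covered so far is < nxt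
--     for p, v in enumerate(nums):
--         if v == key:
--             lo = max(nxt, p - k)
--             hi = min(n - 1, p + k)
--             if lo <= hi:
--                 res.extend(range(lo, hi + 1))
--                 nxt = hi + 1
--     return res
-- ===== Notes on version B (the rewrite author's own statement) =====
-- stated objective: faster
-- what changed: Instead of scanning a k-window for every index (O(n*k)), B walks the key occurrences once and emits each merged distance-k interval directly, clamping at the last emitted index so every output index is produced exactly once.
import Mathlib
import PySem

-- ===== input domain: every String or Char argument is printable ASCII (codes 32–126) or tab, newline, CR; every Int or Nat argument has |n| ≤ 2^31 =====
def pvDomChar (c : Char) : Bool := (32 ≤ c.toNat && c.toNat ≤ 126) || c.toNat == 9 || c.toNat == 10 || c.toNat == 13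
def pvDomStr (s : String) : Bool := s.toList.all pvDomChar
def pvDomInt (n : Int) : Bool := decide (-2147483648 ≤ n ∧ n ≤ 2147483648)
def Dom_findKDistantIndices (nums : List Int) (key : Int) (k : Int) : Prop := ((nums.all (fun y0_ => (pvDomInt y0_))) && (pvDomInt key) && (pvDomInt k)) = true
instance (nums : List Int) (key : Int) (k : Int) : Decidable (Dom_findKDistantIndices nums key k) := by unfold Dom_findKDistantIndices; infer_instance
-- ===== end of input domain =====

-- B replaces A's per-index window scan (plus a list membership test) by a single sweep over the
-- key occurrences that emits each merged distance-k interval once; objective: faster (asymptotic).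

-- ===== PORT A =====
-- literal transliteration of A; nums[j] is ported as pyGetD with default 0: the inner range
-- guarantees 0 ≤ j < len(nums), so the default is never used and Python never raises here.
def findKDistantIndices (nums : List Int) (key : Int) (k : Int) : List Int :=
  let x : Int := (nums.length : Int)
  (PySem.List.pyRange 0 x 1).foldl (fun new i =>
    (PySem.List.pyRange (max 0 (i - k)) (min (nums.length : Int) (i + k + 1)) 1).foldl
      (fun new j =>
        if PySem.List.pyGetD nums j 0 == key then
          if new.contains i then new else new ++ [i]
        else new) new) []

-- ===== PORT B =====
def findKDistantIndices_alt (nums : List Int) (key : Int) (k : Int) : List Int :=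
  let n : Int := (nums.length : Int)
  ((PySem.List.enumerate nums 0).foldl
    (fun (st : Int × List Int) pv =>
      if pv.2 == key then
        let lo := max st.1 (pv.1 - k)
        let hi := min (n - 1) (pv.1 + k)
        if lo ≤ hi then (hi + 1, st.2 ++ PySem.List.pyRange lo (hi + 1) 1)
        else st
      else st) (0, ([] : List Int))).2

-- ===== PRECONDITION & SPEC =====
def Spec_findKDistantIndices (nums : List Int) (key : Int) (k : Int) (out : List Int) : Prop := out = findKDistantIndices_alt nums key k
instance (nums : List Int) (key : Int) (k : Int) (out : List Int) : Decidable (Spec_findKDistantIndices nums key k out) := by unfold Spec_findKDistantIndices; infer_instance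

-- ===== CLAIM (what is proved, stated in full; the proofs are below) =====
def Claim_equal_findKDistantIndices : Prop := ∀ (nums : List Int) (key : Int) (k : Int), Dom_findKDistantIndices nums key k → Spec_findKDistantIndices nums key k (findKDistantIndices nums key k)

-- ===== LEMMAS AND PROOFS =====

-- A's inner j-window test, as a Bool predicate on the index i
def windowHit (nums : List Int) (key k i : Int) : Bool :=
  (PySem.List.pyRange (max 0 (i - k)) (min (nums.length : Int) (i + k + 1)) 1).any
    (fun j => PySem.List.pyGetD nums j 0 == key)

-- A's inner loop when i is already in the accumulator: no change
lemma innerA_mem (nums : List Int) (key i : Int) (js : List Int) (acc : List Int)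
    (h : i ∈ acc) :
    js.foldl (fun new j =>
        if PySem.List.pyGetD nums j 0 == key then
          if new.contains i then new else new ++ [i]
        else new) acc = acc := by
  induction js with
  | nil => rfl
  | cons j js ih =>
    simp only [List.foldl_cons]
    have hc : acc.contains i = true := by simpa using h
    by_cases hq : (PySem.List.pyGetD nums j 0 == key) = true
    · rw [if_pos hq, if_pos hc]; exact ih
    · rw [if_neg hq]; exact ih

-- A's inner loop when i is not yet in the accumulator: append i iff the window hits the key
lemma innerA_notmem (nums : List Int) (key i : Int) (js : List Int) (acc : List Int)
    (h : i ∉ acc) :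
    js.foldl (fun new j =>
        if PySem.List.pyGetD nums j 0 == key then
          if new.contains i then new else new ++ [i]
        else new) acc
      = if js.any (fun j => PySem.List.pyGetD nums j 0 == key) then acc ++ [i] else acc := by
  induction js with
  | nil => simp
  | cons j js ih =>
    simp only [List.foldl_cons, List.any_cons]
    by_cases hq : (PySem.List.pyGetD nums j 0 == key) = true
    · have hc : acc.contains i = false := by simpa using h
      rw [if_pos hq, if_neg (by rw [hc]; exact Bool.false_ne_true),
        innerA_mem nums key i js (acc ++ [i]) (List.mem_append_right acc (List.mem_singleton_self i))]
      simp [hq]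
    · have hq' : (PySem.List.pyGetD nums j 0 == key) = false := by simpa using hq
      rw [if_neg hq, ih]
      simp [hq']

-- A's outer loop is a filter of the index range by the window test
lemma outerA (nums : List Int) (key k : Int) :
    ∀ (m : Nat) (a b : Int) (acc : List Int), (b - a).toNat = m → (∀ y ∈ acc, y < a) →
    (PySem.List.pyRange a b 1).foldl (fun new i =>
      (PySem.List.pyRange (max 0 (i - k)) (min (nums.length : Int) (i + k + 1)) 1).foldl
        (fun new j =>
          if PySem.List.pyGetD nums j 0 == key then
            if new.contains i then new else new ++ [i]
          else new) new) acc
    = acc ++ (PySem.List.pyRange a b 1).filter (windowHit nums key k) := by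
  intro m
  induction m with
  | zero =>
    intro a b acc hm _
    have hba : b ≤ a := by omega
    simp [PySem.List.pyRange_one_eq_nil hba]
  | succ m ih =>
    intro a b acc hm hacc
    have hab : a < b := by omega
    rw [PySem.List.pyRange_one_cons hab]
    simp only [List.foldl_cons, List.filter_cons]
    have hna : a ∉ acc := fun h => absurd (hacc a h) (lt_irrefl a)
    rw [innerA_notmem nums key a _ acc hna]
    have hwdef : ((PySem.List.pyRange (max 0 (a - k)) (min (nums.length : Int) (a + k + 1)) 1).any
        (fun j => PySem.List.pyGetD nums j 0 == key)) = windowHit nums key k a := rfl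
    rw [hwdef]
    have hm' : (b - (a + 1)).toNat = m := by omega
    by_cases hw : windowHit nums key k a = true
    · have hacc' : ∀ y ∈ acc ++ [a], y < a + 1 := by
        intro y hy
        rcases List.mem_append.mp hy with h | h
        · exact lt_trans (hacc y h) (by omega)
        · simp at h; omega
      rw [hw]
      simp only [if_true]
      rw [ih (a + 1) b (acc ++ [a]) hm' hacc']
      simp
    · have hw' : windowHit nums key k a = false := by simpa using hw
      rw [hw']
      have hacc' : ∀ y ∈ acc, y < a + 1 := fun y hy => lt_trans (hacc y hy) (by omega)
      simp only [Bool.false_eq_true, if_false]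
      rw [ih (a + 1) b acc hm' hacc']

lemma A_char (nums : List Int) (key k : Int) :
    findKDistantIndices nums key k
      = (PySem.List.pyRange 0 (nums.length : Int) 1).filter (windowHit nums key k) := by
  unfold findKDistantIndices
  simpa using outerA nums key k ((nums.length : Int) - 0).toNat 0 (nums.length : Int) [] rfl
    (by intro y hy; simp at hy)

-- coverage: index x lies within distance k of an occurrence of key
def covered (nums : List Int) (key k x : Int) : Prop :=
  ∃ (j : Nat) (h : j < nums.length), nums[j] = key ∧ (j : Int) - k ≤ x ∧ x ≤ (j : Int) + k

lemma A_mem (nums : List Int) (key k x : Int) :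
    x ∈ findKDistantIndices nums key k ↔
      (0 ≤ x ∧ x ≤ (nums.length : Int) - 1 ∧ covered nums key k x) := by
  rw [A_char]
  simp only [List.mem_filter, PySem.List.mem_pyRange_one, windowHit, List.any_eq_true]
  unfold covered
  constructor
  · rintro ⟨⟨hx0, hxn⟩, j, hj, hkey⟩
    have hj0 : 0 ≤ j := by omega
    have hjn : j < (nums.length : Int) := by omega
    have hjj : ((j.toNat : Nat) : Int) = j := Int.toNat_of_nonneg hj0
    have hkey' : PySem.List.pyGetD nums j 0 = key := by simpa using hkey
    rw [← hjj, PySem.List.pyGetD_natCast,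
      List.getD_eq_getElem nums 0 (by omega)] at hkey'
    exact ⟨hx0, by omega, j.toNat, by omega, hkey', by omega, by omega⟩
  · rintro ⟨hx0, hxn, j, hj, hkey, h1, h2⟩
    refine ⟨⟨hx0, by omega⟩, (j : Int), by omega, ?_⟩
    have : PySem.List.pyGetD nums ((j : Nat) : Int) 0 = key := by
      rw [PySem.List.pyGetD_natCast, List.getD_eq_getElem nums 0 hj]; exact hkey
    simpa using this

lemma A_sorted (nums : List Int) (key k : Int) :
    (findKDistantIndices nums key k).Pairwise (fun a b => a < b) := by
  rw [A_char]
  exact (PySem.List.pairwise_lt_pyRange_one 0 (nums.length : Int)).filter _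

-- B's sweep: invariant-based characterisation of the fold over the enumerated suffix.
-- C is the coverage achieved by the already-processed prefix; nxt bounds it from above, and
-- hclamp says clamping lo to nxt is safe for every still-to-come position q ≥ s.
lemma B_loop (key k n : Int) :
    ∀ (xs : List Int) (s nxt : Int) (res : List Int) (C : Int → Prop)
      (_ : ∀ x, x ∈ res ↔ C x)
      (_ : res.Pairwise (fun a b => a < b))
      (_ : ∀ x, C x → x < nxt)
      (_ : 0 ≤ nxt)
      (_ : ∀ q x : Int, s ≤ q → 0 ≤ x → x ≤ n - 1 → q - k ≤ x → x < nxt → C x),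
    (∀ x, x ∈ ((PySem.List.enumerate xs s).foldl
        (fun (st : Int × List Int) pv =>
          if pv.2 == key then
            let lo := max st.1 (pv.1 - k)
            let hi := min (n - 1) (pv.1 + k)
            if lo ≤ hi then (hi + 1, st.2 ++ PySem.List.pyRange lo (hi + 1) 1)
            else st
          else st) (nxt, res)).2 ↔
      (C x ∨ ∃ (j : Nat) (_ : j < xs.length), xs[j] = key ∧ 0 ≤ x ∧ x ≤ n - 1 ∧
          (s + j) - k ≤ x ∧ x ≤ (s + j) + k))
    ∧ ((PySem.List.enumerate xs s).foldl
        (fun (st : Int × List Int) pv =>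
          if pv.2 == key then
            let lo := max st.1 (pv.1 - k)
            let hi := min (n - 1) (pv.1 + k)
            if lo ≤ hi then (hi + 1, st.2 ++ PySem.List.pyRange lo (hi + 1) 1)
            else st
          else st) (nxt, res)).2.Pairwise (fun a b => a < b) := by
  intro xs
  induction xs with
  | nil =>
    intro s nxt res C hres hsort _ _ _
    constructor
    · intro x; simp [PySem.List.enumerate, hres x]
    · simpa [PySem.List.enumerate] using hsort
  | cons v xs ih =>
    intro s nxt res C hres hsort hlt hnxt hclamp
    rw [PySem.List.enumerate_cons]
    simp only [List.foldl_cons]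
    by_cases hv : (v == key) = true
    · have hvk : v = key := beq_iff_eq.mp hv
      rw [if_pos hv]
      by_cases hle : max nxt (s - k) ≤ min (n - 1) (s + k)
      · -- interval non-empty: emit [lo, hi] and advance nxt
        rw [if_pos hle]
        set lo := max nxt (s - k) with hlo
        set hi := min (n - 1) (s + k) with hhi
        have hC' : ∀ x, x ∈ res ++ PySem.List.pyRange lo (hi + 1) 1 ↔
            (C x ∨ (lo ≤ x ∧ x ≤ hi)) := by
          intro x
          rw [List.mem_append, hres x, PySem.List.mem_pyRange_one]
          constructor
          · rintro (h | h)
            · exact Or.inl h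
            · exact Or.inr ⟨h.1, by omega⟩
          · rintro (h | h)
            · exact Or.inl h
            · exact Or.inr ⟨h.1, by omega⟩
        have hsort' : (res ++ PySem.List.pyRange lo (hi + 1) 1).Pairwise (fun a b => a < b) := by
          rw [List.pairwise_append]
          refine ⟨hsort, PySem.List.pairwise_lt_pyRange_one lo (hi + 1), ?_⟩
          intro a ha b hb
          have hca := hlt a ((hres a).mp ha)
          have hbb := (PySem.List.mem_pyRange_one.mp hb).1
          omega
        have hlt' : ∀ x, (C x ∨ (lo ≤ x ∧ x ≤ hi)) → x < hi + 1 := by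
          intro x hx
          rcases hx with hx | hx
          · have := hlt x hx; omega
          · omega
        have hnxt' : (0:Int) ≤ hi + 1 := by omega
        have hclamp' : ∀ q x : Int, s + 1 ≤ q → 0 ≤ x → x ≤ n - 1 → q - k ≤ x → x < hi + 1 →
            (C x ∨ (lo ≤ x ∧ x ≤ hi)) := by
          intro q x hq hx0 hxn hqk hxhi
          by_cases hxlo : lo ≤ x
          · exact Or.inr ⟨hxlo, by omega⟩
          · exact Or.inl (hclamp q x (by omega) hx0 hxn hqk (by omega))
        obtain ⟨hmem, hsrt⟩ := ih (s + 1) (hi + 1) (res ++ PySem.List.pyRange lo (hi + 1) 1)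
          (fun x => C x ∨ (lo ≤ x ∧ x ≤ hi)) hC' hsort' hlt' hnxt' hclamp'
        refine ⟨?_, hsrt⟩
        intro x
        rw [hmem x]
        constructor
        · rintro ((h | h) | ⟨j, hj, hkey, hx0, hxn, h1, h2⟩)
          · exact Or.inl h
          · exact Or.inr ⟨0, by simp, by simpa using hvk, by omega, by omega, by omega, by omega⟩
          · exact Or.inr ⟨j + 1, by simpa using hj, by simpa using hkey,
              hx0, hxn, by push_cast; omega, by push_cast; omega⟩
        · rintro (h | ⟨j, hj, hkey, hx0, hxn, h1, h2⟩)
          · exact Or.inl (Or.inl h)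
          · cases j with
            | zero =>
              simp only [List.getElem_cons_zero] at hkey
              simp only [Nat.cast_zero, add_zero] at h1 h2
              by_cases hxlo : lo ≤ x
              · exact Or.inl (Or.inr ⟨hxlo, by omega⟩)
              · exact Or.inl (Or.inl (hclamp s x le_rfl hx0 hxn (by omega) (by omega)))
            | succ j =>
              exact Or.inr ⟨j, by simpa using hj, by simpa using hkey, hx0, hxn,
                by push_cast at h1 ⊢; omega, by push_cast at h2 ⊢; omega⟩
      · -- interval empty after clamping: nothing new is covered
        rw [if_neg hle]
        have hclamp' : ∀ q x : Int, s + 1 ≤ q → 0 ≤ x → x ≤ n - 1 → q - k ≤ x → x < nxt → C x :=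
          fun q x hq => hclamp q x (by omega)
        obtain ⟨hmem, hsrt⟩ := ih (s + 1) nxt res C hres hsort hlt hnxt hclamp'
        refine ⟨?_, hsrt⟩
        intro x
        rw [hmem x]
        constructor
        · rintro (h | ⟨j, hj, hkey, hx0, hxn, h1, h2⟩)
          · exact Or.inl h
          · exact Or.inr ⟨j + 1, by simpa using hj, by simpa using hkey, hx0, hxn,
              by push_cast at h1 ⊢; omega, by push_cast at h2 ⊢; omega⟩
        · rintro (h | ⟨j, hj, hkey, hx0, hxn, h1, h2⟩)
          · exact Or.inl h
          · cases j with
            | zero =>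
              simp only [List.getElem_cons_zero] at hkey
              simp only [Nat.cast_zero, add_zero] at h1 h2
              exact Or.inl (hclamp s x le_rfl hx0 hxn (by omega) (by omega))
            | succ j =>
              exact Or.inr ⟨j, by simpa using hj, by simpa using hkey, hx0, hxn,
                by push_cast at h1 ⊢; omega, by push_cast at h2 ⊢; omega⟩
    · -- v ≠ key: state unchanged
      have hvk : v ≠ key := by simpa using hv
      rw [if_neg hv]
      have hclamp' : ∀ q x : Int, s + 1 ≤ q → 0 ≤ x → x ≤ n - 1 → q - k ≤ x → x < nxt → C x :=
        fun q x hq => hclamp q x (by omega)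
      obtain ⟨hmem, hsrt⟩ := ih (s + 1) nxt res C hres hsort hlt hnxt hclamp'
      refine ⟨?_, hsrt⟩
      intro x
      rw [hmem x]
      constructor
      · rintro (h | ⟨j, hj, hkey, hx0, hxn, h1, h2⟩)
        · exact Or.inl h
        · exact Or.inr ⟨j + 1, by simpa using hj, by simpa using hkey, hx0, hxn,
            by push_cast at h1 ⊢; omega, by push_cast at h2 ⊢; omega⟩
      · rintro (h | ⟨j, hj, hkey, hx0, hxn, h1, h2⟩)
        · exact Or.inl h
        · cases j with
          | zero => exact absurd (by simpa using hkey) hvk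
          | succ j =>
            exact Or.inr ⟨j, by simpa using hj, by simpa using hkey, hx0, hxn,
              by push_cast at h1 ⊢; omega, by push_cast at h2 ⊢; omega⟩

lemma B_mem (nums : List Int) (key k x : Int) :
    x ∈ findKDistantIndices_alt nums key k ↔
      (0 ≤ x ∧ x ≤ (nums.length : Int) - 1 ∧ covered nums key k x) := by
  obtain ⟨hmem, _⟩ := B_loop key k (nums.length : Int) nums 0 0 [] (fun _ => False)
    (by intro x; simp) (by simp) (fun x h => h.elim)
    le_rfl (by intro q x _ hx0 _ _ hx; omega)
  unfold findKDistantIndices_alt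
  dsimp only
  rw [hmem x]
  unfold covered
  constructor
  · rintro (h | ⟨j, hj, hkey, hx0, hxn, h1, h2⟩)
    · exact h.elim
    · exact ⟨hx0, hxn, j, hj, hkey, by omega, by omega⟩
  · rintro ⟨hx0, hxn, j, hj, hkey, h1, h2⟩
    exact Or.inr ⟨j, hj, hkey, hx0, hxn, by omega, by omega⟩

lemma B_sorted (nums : List Int) (key k : Int) :
    (findKDistantIndices_alt nums key k).Pairwise (fun a b => a < b) := by
  obtain ⟨_, hsrt⟩ := B_loop key k (nums.length : Int) nums 0 0 [] (fun _ => False)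
    (by intro x; simp) (by simp) (fun x h => h.elim)
    le_rfl (by intro q x _ hx0 _ _ hx; omega)
  unfold findKDistantIndices_alt
  dsimp only
  exact hsrt

-- ===== VERDICT (by name: the statement is the Claim_ definition above) =====
theorem findKDistantIndices_spec : Claim_equal_findKDistantIndices := by
  intro nums key k _
  unfold Spec_findKDistantIndices
  have hA := A_sorted nums key k
  have hB := B_sorted nums key k
  have hperm : (findKDistantIndices nums key k).Perm (findKDistantIndices_alt nums key k) :=
    (List.perm_ext_iff_of_nodup (hA.imp (fun h => ne_of_lt h)) (hB.imp (fun h => ne_of_lt h))).mpr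
      (fun a => (A_mem nums key k a).trans (B_mem nums key k a).symm)
  exact List.Perm.eq_of_pairwise (fun a b _ _ hab hba => absurd hba (lt_asymm hab)) hA hB hperm
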